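-- pv_equiv track=rewrite | github.com/paa04/CG | cg3/plots.py | count_steps_wu
-- ===== SOURCE A (Python) =====
-- def count_steps_wu(points):
--     n = 0
--     x, y = points[0][0], points[0][1]
--     for i in range(len(points) // 2):
--         x_new, y_new = points[i * 2][0], points[i * 2][1]
--         if x_new != x and y_new != y:
--             n += 1
--         x, y = x_new, y_new
--
--     return n
-- ===== SOURCE B (Python) =====
-- def count_steps_wu(points):
--     # Inclusion-exclusion over the even-indexed subsample: a step changes both
--     # coordinates iff it is not an x-repeat and not a y-repeat, so
--     # answer = (#adjacent pairs) - (#x equal) - (#y equal) + (#both equal).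
--     s = [points[2 * i] for i in range(len(points) // 2)]
--     pairs = list(zip(s, s[1:]))
--     ex = sum(a[0] == b[0] for a, b in pairs)
--     ey = sum(a[1] == b[1] for a, b in pairs)
--     exy = sum(a[0] == b[0] and a[1] == b[1] for a, b in pairs)
--     return len(pairs) - ex - ey + exy
-- ===== Notes on version B (the rewrite author's own statement) =====
-- stated objective: alternative
-- what changed: Replaces A's stateful running-previous loop with a single counter by inclusion-exclusion: three independent equality counts (x equal, y equal, both equal) over adjacent pairs of the even-indexed subsample, combined as total - ex - ey + exy.
import Mathlib
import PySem

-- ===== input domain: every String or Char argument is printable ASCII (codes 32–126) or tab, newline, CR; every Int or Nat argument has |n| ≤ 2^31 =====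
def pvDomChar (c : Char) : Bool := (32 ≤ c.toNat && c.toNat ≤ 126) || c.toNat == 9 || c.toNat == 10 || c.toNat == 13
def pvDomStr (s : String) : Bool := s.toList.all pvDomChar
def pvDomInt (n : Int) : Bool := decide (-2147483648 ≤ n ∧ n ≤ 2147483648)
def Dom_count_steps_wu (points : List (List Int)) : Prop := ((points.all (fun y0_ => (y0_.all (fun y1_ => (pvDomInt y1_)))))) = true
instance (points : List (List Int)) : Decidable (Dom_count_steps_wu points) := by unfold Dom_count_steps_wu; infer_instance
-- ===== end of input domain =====

-- B replaces A's stateful running-previous loop by inclusion-exclusion over the even-indexed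
-- subsample: three separate equality counts combined arithmetically (objective: alternative).

-- ===== PORT A =====
def count_steps_wu (points : List (List Int)) : Int :=
  let x := PySem.List.pyGetD (PySem.List.pyGetD points 0 []) 0 0
  let y := PySem.List.pyGetD (PySem.List.pyGetD points 0 []) 1 0
  ((PySem.List.pyRange 0 (PySem.Int.floordiv points.length 2) 1).foldl
    (fun (st : Int × Int × Int) i =>
      let xn := PySem.List.pyGetD (PySem.List.pyGetD points (i * 2) []) 0 0
      let yn := PySem.List.pyGetD (PySem.List.pyGetD points (i * 2) []) 1 0
      ((if xn ≠ st.2.1 ∧ yn ≠ st.2.2 then st.1 + 1 else st.1), xn, yn))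
    ((0 : Int), x, y)).1

-- ===== PORT B =====
def count_steps_wu_alt (points : List (List Int)) : Int :=
  let s := (PySem.List.pyRange 0 (PySem.Int.floordiv points.length 2) 1).map
    (fun i => PySem.List.pyGetD points (2 * i) [])
  let pairs := s.zip (PySem.List.slice s (some 1) none)
  let ex := (pairs.map (fun ab =>
    if PySem.List.pyGetD ab.1 0 0 = PySem.List.pyGetD ab.2 0 0 then (1 : Int) else 0)).sum
  let ey := (pairs.map (fun ab =>
    if PySem.List.pyGetD ab.1 1 0 = PySem.List.pyGetD ab.2 1 0 then (1 : Int) else 0)).sum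
  let exy := (pairs.map (fun ab =>
    if PySem.List.pyGetD ab.1 0 0 = PySem.List.pyGetD ab.2 0 0 ∧
       PySem.List.pyGetD ab.1 1 0 = PySem.List.pyGetD ab.2 1 0 then (1 : Int) else 0)).sum
  (pairs.length : Int) - ex - ey + exy

-- ===== PRECONDITION & SPEC =====
-- Pre_ excludes exactly the inputs where A raises IndexError: the empty list
-- (points[0] is read before the loop) and inputs where points[0] or an accessed
-- even-indexed point has fewer than two coordinates.
def Pre_count_steps_wu (points : List (List Int)) : Prop :=
  points ≠ [] ∧ 2 ≤ (points.getD 0 []).length ∧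
    ∀ i < points.length / 2, 2 ≤ (points.getD (2 * i) []).length
instance (points : List (List Int)) : Decidable (Pre_count_steps_wu points) := by
  unfold Pre_count_steps_wu; infer_instance
def pvWitness_count_steps_wu : List (List Int) := [[0, 0], [1, 1]]
def Spec_count_steps_wu (points : List (List Int)) (out : Int) : Prop := out = count_steps_wu_alt points
instance (points : List (List Int)) (out : Int) : Decidable (Spec_count_steps_wu points out) := by unfold Spec_count_steps_wu; infer_instance

-- ===== CLAIM (what is proved, stated in full; the proofs are below) =====
def Claim_equal_count_steps_wu : Prop := ∀ (points : List (List Int)), Dom_count_steps_wu points → Pre_count_steps_wu points → Spec_count_steps_wu points (count_steps_wu points)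

-- ===== LEMMAS AND PROOFS =====

-- A's loop step on a new coordinate pair q with state (n, prev).
def pvStep (st : Int × Int × Int) (q : Int × Int) : Int × Int × Int :=
  (if q.1 ≠ st.2.1 ∧ q.2 ≠ st.2.2 then st.1 + 1 else st.1, q.1, q.2)

-- Count of adjacent pairs (prev, next) whose coordinates both differ.
def pvCntA (L : List (Int × Int)) : Int :=
  ((L.zip L.tail).map
    (fun pq => if pq.2.1 ≠ pq.1.1 ∧ pq.2.2 ≠ pq.1.2 then (1 : Int) else 0)).sum

theorem pv_foldl_cnt : ∀ (L : List (Int × Int)) (p : Int × Int) (n0 : Int),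
    (L.foldl pvStep (n0, p.1, p.2)).1 = n0 + pvCntA (p :: L) := by
  intro L
  induction L with
  | nil => intro p n0; simp [pvCntA]
  | cons q L ih =>
    intro p n0
    have h1 : pvStep (n0, p.1, p.2) q
        = ((if q.1 ≠ p.1 ∧ q.2 ≠ p.2 then n0 + 1 else n0), q.1, q.2) := rfl
    have h2 : pvCntA (p :: q :: L)
        = (if q.1 ≠ p.1 ∧ q.2 ≠ p.2 then (1 : Int) else 0) + pvCntA (q :: L) := by
      simp [pvCntA]
    simp only [List.foldl_cons, h1, ih q, h2]
    split_ifs <;> ring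

theorem pv_dup (x : Int × Int) (T : List (Int × Int)) :
    pvCntA (x :: x :: T) = pvCntA (x :: T) := by
  simp [pvCntA]

theorem pv_main (points : List (List Int)) : count_steps_wu points = count_steps_wu_alt points := by
  have hfd : PySem.Int.floordiv (points.length : Int) 2 = ((points.length / 2 : Nat) : Int) := by
    exact_mod_cast PySem.Int.floordiv_natCast points.length 2
  set M := points.length / 2 with hM
  set c : List Int → Int × Int := fun a => (PySem.List.pyGetD a 0 0, PySem.List.pyGetD a 1 0) with hc
  set g : Nat → List Int := fun k => points.getD (2 * k) [] with hg
  -- A side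
  have hA : count_steps_wu points = 0 + pvCntA (c (points.getD 0 []) :: (List.range M).map (fun k => c (g k))) := by
    rw [count_steps_wu]
    rw [hfd, PySem.List.pyRange_zero_nat, List.foldl_map]
    have hbody : (fun (st : Int × Int × Int) (k : Nat) =>
        ((if PySem.List.pyGetD (PySem.List.pyGetD points ((k : Int) * 2) []) 0 0 ≠ st.2.1 ∧
              PySem.List.pyGetD (PySem.List.pyGetD points ((k : Int) * 2) []) 1 0 ≠ st.2.2
          then st.1 + 1 else st.1),
          PySem.List.pyGetD (PySem.List.pyGetD points ((k : Int) * 2) []) 0 0,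
          PySem.List.pyGetD (PySem.List.pyGetD points ((k : Int) * 2) []) 1 0))
        = fun st k => pvStep st (c (g k)) := by
      funext st k
      rw [show ((k : Int) * 2) = ((2 * k : Nat) : Int) from by push_cast; ring]
      simp only [pvStep, hc, hg, PySem.List.pyGetD_natCast]
    rw [hbody, ← List.foldl_map]
    have := pv_foldl_cnt ((List.range M).map (fun k => c (g k))) (c (points.getD 0 [])) 0
    simpa [hc, PySem.List.pyGetD_zero] using this
  -- B side: inclusion-exclusion over the subsample equals pvCntA
  have hcnt : ∀ (L : List (List Int)),
      pvCntA (L.map c)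
        = (((L.zip (PySem.List.slice L (some 1) none)).length : Int)
          - ((L.zip (PySem.List.slice L (some 1) none)).map (fun ab =>
              if PySem.List.pyGetD ab.1 0 0 = PySem.List.pyGetD ab.2 0 0 then (1 : Int) else 0)).sum
          - ((L.zip (PySem.List.slice L (some 1) none)).map (fun ab =>
              if PySem.List.pyGetD ab.1 1 0 = PySem.List.pyGetD ab.2 1 0 then (1 : Int) else 0)).sum
          + ((L.zip (PySem.List.slice L (some 1) none)).map (fun ab =>
              if PySem.List.pyGetD ab.1 0 0 = PySem.List.pyGetD ab.2 0 0 ∧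
                 PySem.List.pyGetD ab.1 1 0 = PySem.List.pyGetD ab.2 1 0 then (1 : Int) else 0)).sum) := by
    intro L
    rw [PySem.List.slice_from_one]
    induction L with
    | nil => simp [pvCntA]
    | cons a T ih =>
      cases T with
      | nil => simp [pvCntA]
      | cons b T' =>
        have h1 : pvCntA (c a :: c b :: T'.map c)
            = (if PySem.List.pyGetD b 0 0 ≠ PySem.List.pyGetD a 0 0 ∧
                  PySem.List.pyGetD b 1 0 ≠ PySem.List.pyGetD a 1 0 then (1 : Int) else 0)
              + pvCntA (c b :: T'.map c) := by
          simp [pvCntA, hc]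
        simp only [List.map_cons] at ih ⊢
        rw [h1, ih]
        simp only [List.tail_cons, List.zip_cons_cons, List.map_cons, List.sum_cons,
          List.length_cons]
        push_cast
        split_ifs <;> omega
  have hB : count_steps_wu_alt points = pvCntA ((List.range M).map (fun k => c (g k))) := by
    rw [count_steps_wu_alt]
    rw [hfd, PySem.List.pyRange_zero_nat, List.map_map]
    have hmap : (List.map ((fun i => PySem.List.pyGetD points (2 * i) []) ∘ fun k : Nat => (k : Int)) (List.range M))
        = (List.range M).map g := by
      apply List.map_congr_left
      intro k _
      show PySem.List.pyGetD points (2 * (k : Int)) [] = g k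
      rw [show ((2 : Int) * (k : Int)) = ((2 * k : Nat) : Int) from by push_cast; ring]
      simp only [hg, PySem.List.pyGetD_natCast]
    rw [hmap, ← hcnt ((List.range M).map g), List.map_map]
    rfl
  rw [hA, hB, zero_add]
  -- final: drop the duplicated head
  cases hM' : M with
  | zero => simp [pvCntA]
  | succ M' =>
    rw [List.range_succ_eq_map]
    simp only [List.map_cons, List.map_map]
    have h0 : g 0 = points.getD 0 [] := by simp [hg]
    rw [← h0]
    rw [pv_dup]

-- ===== VERDICT (by name: the statement is the Claim_ definition above) =====
theorem count_steps_wu_spec : Claim_equal_count_steps_wu := by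
  intro points _ _
  unfold Spec_count_steps_wu
  exact pv_main points
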